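-- pv_equiv track=rewrite | github.com/adarshan-intel/LLMart | examples/basic/model_position.py | _find_attack_key
-- ===== SOURCE A (Python) =====
-- from typing import Any
-- from collections.abc import Mapping
--
-- def _find_attack_key(attack_init: Mapping[str, Any]):
--     # Store the attack mask name
--     found, mask_name = False, None
--     for key in attack_init:
--         if key in ["prefix_mask", "suffix_mask"] and found:
--             raise ValueError(
--                 "Optimizing adversarial block position doesn't currently support simultaneous prefix and suffix!"
--             )
--
--         if key in ["prefix_mask", "suffix_mask"]:
--             found = True
--             mask_name = key
--
--     if not mask_name:
--         raise ValueError(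
--             "Optimizing adversarial block position requires attack=suffix or attack=prefix!"
--         )
--
--     return mask_name
-- ===== SOURCE B (Python) =====
-- def _find_attack_key(attack_init):
--     has_prefix = "prefix_mask" in attack_init
--     has_suffix = "suffix_mask" in attack_init
--     if has_prefix and has_suffix:
--         raise ValueError(
--             "Optimizing adversarial block position doesn't currently support simultaneous prefix and suffix!"
--         )
--     if not (has_prefix or has_suffix):
--         raise ValueError(
--             "Optimizing adversarial block position requires attack=suffix or attack=prefix!"
--         )
--     return "prefix_mask" if has_prefix else "suffix_mask"
-- ===== Notes on version B (the rewrite author's own statement) =====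
-- stated objective: simpler
-- what changed: Replaces the key loop with its found-flag and mask accumulator by two direct membership tests and a three-way branch.
import Mathlib
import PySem

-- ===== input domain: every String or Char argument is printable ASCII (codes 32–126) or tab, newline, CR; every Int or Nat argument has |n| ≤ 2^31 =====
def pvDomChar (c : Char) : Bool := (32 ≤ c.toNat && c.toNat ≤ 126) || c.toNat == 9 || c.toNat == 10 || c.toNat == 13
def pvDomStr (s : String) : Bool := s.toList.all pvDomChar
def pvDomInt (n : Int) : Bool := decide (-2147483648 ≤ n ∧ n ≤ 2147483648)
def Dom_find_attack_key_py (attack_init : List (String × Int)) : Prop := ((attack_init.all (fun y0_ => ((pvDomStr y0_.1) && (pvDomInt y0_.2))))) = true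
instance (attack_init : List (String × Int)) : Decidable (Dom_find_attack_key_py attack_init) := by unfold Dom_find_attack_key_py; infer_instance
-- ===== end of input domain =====

-- B replaces A's key loop (found-flag + mask accumulator) by two direct membership tests and a three-way branch; same value wherever A returns.

-- ===== PORT A =====
-- A's loop over the dict's keys; `none` stands for either of A's explicit raises
-- (Pre_ excludes exactly those inputs), the loop carries A's (found, mask_name) state.
def findAttackLoopA : List String → Bool → Option String → Option String
  | [], _, mask => mask
  | k :: rest, found, mask =>
    if (k = "prefix_mask" ∨ k = "suffix_mask") ∧ found then none
    else if k = "prefix_mask" ∨ k = "suffix_mask" then findAttackLoopA rest true (some k)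
    else findAttackLoopA rest found mask

def find_attack_key_py (attack_init : List (String × Int)) : String :=
  (findAttackLoopA (attack_init.map Prod.fst) false none).getD ""

-- ===== PORT B =====
-- ""` is the raise path (excluded by Pre_), matching Source B's two ValueErrors.
def find_attack_key_py_alt (attack_init : List (String × Int)) : String :=
  let ks := attack_init.map Prod.fst
  let hasPrefix := "prefix_mask" ∈ ks
  let hasSuffix := "suffix_mask" ∈ ks
  if hasPrefix ∧ hasSuffix then ""
  else if ¬ (hasPrefix ∨ hasSuffix) then ""
  else if hasPrefix then "prefix_mask" else "suffix_mask"

-- ===== PRECONDITION & SPEC =====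
-- Pre_ excludes (a) the inputs on which A raises ValueError (both mask keys present, or
-- neither), and (b) association lists with duplicate keys, which cannot arise from a
-- Python Mapping and on which the list-level behaviour is accidental.
def Pre_find_attack_key_py (attack_init : List (String × Int)) : Prop :=
  (attack_init.map Prod.fst).Nodup ∧
  (("prefix_mask" ∈ attack_init.map Prod.fst) ≠ ("suffix_mask" ∈ attack_init.map Prod.fst))
instance (attack_init : List (String × Int)) : Decidable (Pre_find_attack_key_py attack_init) := by unfold Pre_find_attack_key_py; infer_instance

def pvWitness_find_attack_key_py : (List (String × Int)) := [("prefix_mask", 0)]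

def Spec_find_attack_key_py (attack_init : List (String × Int)) (out : String) : Prop := out = find_attack_key_py_alt attack_init
instance (attack_init : List (String × Int)) (out : String) : Decidable (Spec_find_attack_key_py attack_init out) := by unfold Spec_find_attack_key_py; infer_instance

-- ===== CLAIM =====
def Claim_equal_find_attack_key_py : Prop := ∀ (attack_init : List (String × Int)), Dom_find_attack_key_py attack_init → Pre_find_attack_key_py attack_init → Spec_find_attack_key_py attack_init (find_attack_key_py attack_init)

-- ===== LEMMAS AND PROOFS =====

-- If no mask key remains, A's loop just returns its accumulator.
lemma findAttackLoopA_none (ks : List String) (f : Bool) (m : Option String)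
    (hp : "prefix_mask" ∉ ks) (hs : "suffix_mask" ∉ ks) :
    findAttackLoopA ks f m = m := by
  induction ks generalizing f m with
  | nil => rfl
  | cons k rest ih =>
    simp only [List.mem_cons, not_or] at hp hs
    have hk : ¬ (k = "prefix_mask" ∨ k = "suffix_mask") := by
      rintro (h | h) <;> simp_all
    simp [findAttackLoopA, hk, ih _ _ hp.2 hs.2]

-- Exactly one mask key present (Nodup) ⇒ A's loop finds it.
lemma findAttackLoopA_prefix : ∀ ks : List String, ks.Nodup →
    "prefix_mask" ∈ ks → "suffix_mask" ∉ ks →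
    findAttackLoopA ks false none = some "prefix_mask"
  | [], _, hp, _ => absurd hp (by simp)
  | k :: rest, hnd, hp, hs => by
    rcases List.nodup_cons.mp hnd with ⟨hknr, hrest⟩
    simp only [List.mem_cons, not_or] at hs
    by_cases hk : k = "prefix_mask"
    · subst hk
      have hstep : findAttackLoopA ("prefix_mask" :: rest) false none
          = findAttackLoopA rest true (some "prefix_mask") := by simp [findAttackLoopA]
      rw [hstep]
      exact findAttackLoopA_none rest true (some "prefix_mask") hknr hs.2
    · have hks : k ≠ "suffix_mask" := fun h => hs.1 h.symm
      have hp' : "prefix_mask" ∈ rest := by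
        rcases List.mem_cons.mp hp with h | h
        · exact absurd h.symm hk
        · exact h
      have hstep : findAttackLoopA (k :: rest) false none
          = findAttackLoopA rest false none := by simp [findAttackLoopA, hk, hks]
      rw [hstep]
      exact findAttackLoopA_prefix rest hrest hp' hs.2

lemma findAttackLoopA_suffix : ∀ ks : List String, ks.Nodup →
    "suffix_mask" ∈ ks → "prefix_mask" ∉ ks →
    findAttackLoopA ks false none = some "suffix_mask"
  | [], _, hs, _ => absurd hs (by simp)
  | k :: rest, hnd, hs, hp => by
    rcases List.nodup_cons.mp hnd with ⟨hknr, hrest⟩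
    simp only [List.mem_cons, not_or] at hp
    by_cases hk : k = "suffix_mask"
    · subst hk
      have hstep : findAttackLoopA ("suffix_mask" :: rest) false none
          = findAttackLoopA rest true (some "suffix_mask") := by simp [findAttackLoopA]
      rw [hstep]
      exact findAttackLoopA_none rest true (some "suffix_mask") hp.2 hknr
    · have hkp : k ≠ "prefix_mask" := fun h => hp.1 h.symm
      have hs' : "suffix_mask" ∈ rest := by
        rcases List.mem_cons.mp hs with h | h
        · exact absurd h.symm hk
        · exact h
      have hstep : findAttackLoopA (k :: rest) false none
          = findAttackLoopA rest false none := by simp [findAttackLoopA, hk, hkp]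
      rw [hstep]
      exact findAttackLoopA_suffix rest hrest hs' hp.2

-- ===== VERDICT =====
theorem find_attack_key_py_spec : Claim_equal_find_attack_key_py := by
  intro l _ hpre
  rcases hpre with ⟨hnd, hne⟩
  unfold Spec_find_attack_key_py find_attack_key_py find_attack_key_py_alt
  by_cases hp : "prefix_mask" ∈ l.map Prod.fst
  · have hs : "suffix_mask" ∉ l.map Prod.fst := fun h => hne (by simp [hp, h])
    rw [findAttackLoopA_prefix _ hnd hp hs]
    simp [hp, hs]
  · have hs : "suffix_mask" ∈ l.map Prod.fst := by
      by_contra h; exact hne (by simp [hp, h])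
    rw [findAttackLoopA_suffix _ hnd hs hp]
    simp [hp, hs]
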